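-- pv_equiv track=rewrite | github.com/joshred83/automate_the_boring_stuff | chapter_4/coin_flip_streaks.py | count_streaks
-- ===== SOURCE A (Python) =====
-- def count_streaks(coin_flips: list, streak_size=6) -> int:
--     streaks = 0
--     current_streak = 1
--     for idx in range(1, len(coin_flips)):
--         if coin_flips[idx] == coin_flips[idx - 1]:
--             current_streak += 1
--             if current_streak == 6:
--                 streaks += 1
--         else:
--             current_streak = 1
--     return streaks
-- ===== SOURCE B (Python) =====
-- def count_streaks(coin_flips: list, streak_size=6) -> int:
--     # Decompose the list into maximal runs of equal values and count runs of
--     # length >= 6 (the threshold is hardcoded to 6, as in the original; the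
--     # streak_size parameter is ignored there too).
--     streaks = 0
--     i = 0
--     n = len(coin_flips)
--     while i < n:
--         j = i + 1
--         while j < n and coin_flips[j] == coin_flips[i]:
--             j += 1
--         if j - i >= 6:
--             streaks += 1
--         i = j
--     return streaks
-- ===== Notes on version B (the rewrite author's own statement) =====
-- stated objective: alternative
-- what changed: B splits the list into maximal runs of equal flips (two-level scan over run boundaries) and counts runs of length >= 6, instead of threading a running streak counter through a single index loop and incrementing on the moment the counter hits 6.
import Mathlib
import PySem

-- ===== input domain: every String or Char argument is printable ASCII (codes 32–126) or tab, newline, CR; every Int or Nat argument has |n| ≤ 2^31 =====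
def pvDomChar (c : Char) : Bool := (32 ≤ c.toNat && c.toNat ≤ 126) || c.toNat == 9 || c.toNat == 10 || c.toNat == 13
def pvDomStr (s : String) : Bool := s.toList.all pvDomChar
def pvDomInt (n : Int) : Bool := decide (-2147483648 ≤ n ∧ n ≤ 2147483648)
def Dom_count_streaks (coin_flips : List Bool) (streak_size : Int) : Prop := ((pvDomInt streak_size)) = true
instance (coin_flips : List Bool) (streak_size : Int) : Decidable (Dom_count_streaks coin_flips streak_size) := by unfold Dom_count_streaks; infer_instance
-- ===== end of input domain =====

-- B counts maximal runs of equal flips of length ≥ 6 (run decomposition) instead of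
-- A's single running streak counter; same return value, alternative structure.

-- ===== PORT A =====
-- A: streaks=0; current_streak=1; for idx in range(1, len): compare flips[idx] with flips[idx-1].
def count_streaks (coin_flips : List Bool) (streak_size : Int) : Int :=
  let st :=
    (PySem.List.pyRange 1 (coin_flips.length : Int) 1).foldl
      (fun (s : Int × Int) (idx : Int) =>
        if PySem.List.pyGetD coin_flips idx false == PySem.List.pyGetD coin_flips (idx - 1) false then
          (if s.2 + 1 = 6 then s.1 + 1 else s.1, s.2 + 1)
        else
          (s.1, 1))
      (0, 1)
  st.1

-- ===== PORT B =====
-- B: outer while loop = recursion over maximal runs; inner while loop (advance j while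
-- equal to flips[i]) = takeWhile/dropWhile split of the tail against the run's first flip.
def pvRunsCount : List Bool → Int
  | [] => 0
  | x :: xs =>
    (if 6 ≤ 1 + (xs.takeWhile (· == x)).length then (1 : Int) else 0) +
      pvRunsCount (xs.dropWhile (· == x))
termination_by l => l.length
decreasing_by
  simpa using Nat.lt_succ_of_le (xs.length_dropWhile_le _)

def count_streaks_alt (coin_flips : List Bool) (streak_size : Int) : Int :=
  pvRunsCount coin_flips

-- ===== PRECONDITION & SPEC =====
def Spec_count_streaks (coin_flips : List Bool) (streak_size : Int) (out : Int) : Prop := out = count_streaks_alt coin_flips streak_size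
instance (coin_flips : List Bool) (streak_size : Int) (out : Int) : Decidable (Spec_count_streaks coin_flips streak_size out) := by unfold Spec_count_streaks; infer_instance

-- ===== CLAIM (what is proved, stated in full; the proofs are below) =====
def Claim_equal_count_streaks : Prop := ∀ (coin_flips : List Bool) (streak_size : Int), Dom_count_streaks coin_flips streak_size → Spec_count_streaks coin_flips streak_size (count_streaks coin_flips streak_size)

-- ===== LEMMAS AND PROOFS =====

-- structural form of A's loop: state (streaks, current_streak), previous element threaded
def pvLoop (prev : Bool) (s : Int × Int) : List Bool → Int × Int
  | [] => s
  | b :: bs =>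
    if b == prev then
      pvLoop b (if s.2 + 1 = 6 then s.1 + 1 else s.1, s.2 + 1) bs
    else
      pvLoop b (s.1, 1) bs

-- A's index fold from position i equals pvLoop over the dropped tail
lemma pv_bridge (l : List Bool) :
    ∀ (k : Nat) (i : Int) (s : Int × Int), i = (l.length : Int) - k → 1 ≤ i →
      (PySem.List.pyRange i (l.length : Int) 1).foldl
        (fun (s : Int × Int) (idx : Int) =>
          if PySem.List.pyGetD l idx false == PySem.List.pyGetD l (idx - 1) false then
            (if s.2 + 1 = 6 then s.1 + 1 else s.1, s.2 + 1)
          else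
            (s.1, 1)) s
      = pvLoop (l.getD (i - 1).toNat false) s (l.drop i.toNat) := by
  intro k
  induction k with
  | zero =>
    intro i s hi h1
    rw [PySem.List.pyRange_one_eq_nil (by omega)]
    rw [List.drop_of_length_le (by omega)]
    rfl
  | succ k ih =>
    intro i s hi h1
    have hilt : i < (l.length : Int) := by omega
    have hnat : i.toNat < l.length := by omega
    rw [PySem.List.pyRange_one_cons (by omega)]
    simp only [List.foldl_cons]
    rw [ih (i + 1) _ (by omega) (by omega)]
    rw [List.drop_eq_getElem_cons hnat]
    rw [pvLoop]
    have e1 : (i + 1 - 1).toNat = i.toNat := by omega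
    have e2 : (i + 1).toNat = i.toNat + 1 := by omega
    rw [e1, e2]
    have e3 : l.getD i.toNat false = l[i.toNat] := List.getD_eq_getElem l false hnat
    have e4 : l.getD (i - 1).toNat false = l[(i - 1).toNat] :=
      List.getD_eq_getElem l false (by omega)
    rw [e3, e4]
    rw [PySem.List.pyGetD_eq_getElem l false (by omega) hilt,
        PySem.List.pyGetD_eq_getElem l false (by omega) (show i - 1 < (l.length : Int) by omega)]
    by_cases hc : (l[i.toNat] == l[(i - 1).toNat]) = true
    · rw [if_pos hc, if_pos hc]
    · rw [if_neg hc, if_neg hc]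

-- A's loop counts one per maximal run through which the counter passes 6
lemma pv_loop_runs :
    ∀ (xs : List Bool) (prev : Bool) (streaks cur : Int),
      (pvLoop prev (streaks, cur) xs).1 =
        streaks +
          (if cur < 6 ∧ 6 ≤ cur + ((xs.takeWhile (· == prev)).length : Int) then 1 else 0) +
          pvRunsCount (xs.dropWhile (· == prev)) := by
  intro xs
  induction xs with
  | nil =>
    intro prev streaks cur
    simp only [pvLoop, List.takeWhile_nil, List.dropWhile_nil, List.length_nil,
      Nat.cast_zero, pvRunsCount]
    split_ifs <;> omega
  | cons b bs ih =>
    intro prev streaks cur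
    by_cases hb : b = prev
    · subst hb
      rw [pvLoop]
      simp only [BEq.rfl, if_true, List.takeWhile_cons, List.dropWhile_cons]
      rw [ih]
      simp only [List.length_cons]
      split_ifs <;> omega
    · have hbeq : (b == prev) = false := by simp [hb]
      rw [pvLoop]
      simp only [hbeq, Bool.false_eq_true, if_false, List.takeWhile_cons, List.dropWhile_cons]
      rw [ih b streaks 1]
      rw [pvRunsCount]
      simp only [List.length_nil]
      split_ifs <;> omega

-- ===== VERDICT (by name: the statement is the Claim_ definition above) =====
theorem count_streaks_spec : Claim_equal_count_streaks := by
  intro coin_flips streak_size _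
  unfold Spec_count_streaks count_streaks count_streaks_alt
  cases coin_flips with
  | nil => simp [pvRunsCount, PySem.List.pyRange_one_eq_nil]
  | cons x xs =>
    simp only []
    rw [pv_bridge (x :: xs) xs.length 1 (0, 1) (by simp) le_rfl]
    simp only [show ((1:Int) - 1).toNat = 0 from rfl, show (1:Int).toNat = 1 from rfl,
      List.getD_cons_zero, List.drop_one, List.tail_cons]
    rw [pv_loop_runs, pvRunsCount]
    split_ifs <;> omega
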